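-- pv_equiv track=rewrite | github.com/045200/ad-rules | data/python/generate_mrs.py | smart_domain_dedup
-- ===== SOURCE A (Python) =====
-- def smart_domain_dedup(rules):
--     host_domains = set()
--     host_suffixes = set()
--     regex_rules = set()
--     for rule in rules:
--         if rule.startswith('HOST,'):
--             domain = rule.split(',')[1]
--             host_domains.add(domain)
--         elif rule.startswith('HOST-SUFFIX,'):
--             suffix = rule.split(',')[1]
--             host_suffixes.add(suffix)
--         elif rule.startswith('URL-REGEX,'):
--             regex_rules.add(rule)
--     # 去除被 HOST 覆盖的 HOST-SUFFIX
--     filtered_suffixes = set()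
--     for s in host_suffixes:
--         if not any(d == s or d.endswith('.' + s) for d in host_domains):
--             filtered_suffixes.add(s)
--     results = [f"HOST,{d},REJECT" for d in sorted(host_domains)] + \
--               [f"HOST-SUFFIX,{s},REJECT" for s in sorted(filtered_suffixes)] + \
--               sorted(regex_rules)
--     return results
-- ===== SOURCE B (Python) =====
-- def smart_domain_dedup(rules):
--     # Staged passes: three comprehensions classify the rules, then an inverted
--     # sweep collects every dot-boundary tail of each HOST domain and the kept
--     # suffixes fall out as one set difference.
--     host_domains = {r.split(',')[1] for r in rules if r.startswith('HOST,')}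
--     host_suffixes = {r.split(',')[1] for r in rules if r.startswith('HOST-SUFFIX,')}
--     regex_rules = {r for r in rules if r.startswith('URL-REGEX,')}
--     covered = set()
--     for d in host_domains:
--         covered.add(d)
--         for i, c in enumerate(d):
--             if c == '.':
--                 covered.add(d[i + 1:])
--     kept = host_suffixes - covered
--     return [f"HOST,{d},REJECT" for d in sorted(host_domains)] + \
--            [f"HOST-SUFFIX,{s},REJECT" for s in sorted(kept)] + \
--            sorted(regex_rules)
-- ===== Notes on version B (the rewrite author's own statement) =====
-- stated objective: alternative
-- what changed: A's single classification loop with elif branches becomes three independent comprehension passes, and A's per-suffix endswith scan over all domains is replaced by one sweep collecting each domain's dot-boundary tails into a set followed by a set difference.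
import Mathlib
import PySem

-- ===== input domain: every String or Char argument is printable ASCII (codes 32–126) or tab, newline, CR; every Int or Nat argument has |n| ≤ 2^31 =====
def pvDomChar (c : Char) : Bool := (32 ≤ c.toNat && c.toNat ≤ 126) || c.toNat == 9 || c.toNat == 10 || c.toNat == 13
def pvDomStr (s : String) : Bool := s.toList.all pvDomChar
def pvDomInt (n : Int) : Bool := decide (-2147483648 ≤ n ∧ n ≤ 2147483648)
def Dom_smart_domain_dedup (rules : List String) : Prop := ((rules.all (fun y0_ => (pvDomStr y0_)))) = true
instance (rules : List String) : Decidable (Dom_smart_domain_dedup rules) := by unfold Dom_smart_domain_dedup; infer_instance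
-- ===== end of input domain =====

-- B replaces A's single elif classification loop by three comprehension passes and A's
-- per-suffix endswith scan over all domains by one sweep collecting each domain's
-- dot-boundary tails, then a set difference; return values are proved equal.

-- ===== PORT A =====
-- A-side helper: one step of the classification loop over `rules`.
-- rule.split(',')[1] is ported with pyGetD: under the startswith guard the rule contains a
-- ',', so index 1 always exists and the default "" is never used (no IndexError is reachable).
def pvClassifyStepA (st : PySem.Set String × PySem.Set String × PySem.Set String)
    (rule : String) : PySem.Set String × PySem.Set String × PySem.Set String :=
  if PySem.Str.startswith rule "HOST," then
    (PySem.Set.add st.1 (PySem.List.pyGetD ((PySem.Str.split? rule ",").getD []) 1 ""), st.2.1, st.2.2)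
  else if PySem.Str.startswith rule "HOST-SUFFIX," then
    (st.1, PySem.Set.add st.2.1 (PySem.List.pyGetD ((PySem.Str.split? rule ",").getD []) 1 ""), st.2.2)
  else if PySem.Str.startswith rule "URL-REGEX," then
    (st.1, st.2.1, PySem.Set.add st.2.2 rule)
  else st

def smart_domain_dedup (rules : List String) : List String :=
  let st := rules.foldl pvClassifyStepA (PySem.Set.empty, PySem.Set.empty, PySem.Set.empty)
  let filtered_suffixes := st.2.1.foldl (fun acc s =>
      if !(st.1.any (fun d => d == s || PySem.Str.endswith d ("." ++ s))) then PySem.Set.add acc s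
      else acc) PySem.Set.empty
  (PySem.List.sorted st.1 (fun x => x)).map (fun d => "HOST," ++ d ++ ",REJECT")
    ++ (PySem.List.sorted filtered_suffixes (fun x => x)).map (fun s => "HOST-SUFFIX," ++ s ++ ",REJECT")
    ++ PySem.List.sorted st.2.2 (fun x => x)

-- ===== PORT B =====
-- B-side helper: r.split(',')[1] (the guard guarantees a ',', so the default is unreachable).
def pvSecondField (r : String) : String :=
  PySem.List.pyGetD ((PySem.Str.split? r ",").getD []) 1 ""

-- B-side helper: `covered.add(d); for i, c in enumerate(d): if c == '.': covered.add(d[i+1:])`.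
def pvCoverStep (c : PySem.Set String) (d : String) : PySem.Set String :=
  (PySem.List.enumerate d.toList 0).foldl
    (fun c p => if p.2 == '.' then PySem.Set.add c (PySem.Str.slice d (some (p.1 + 1)) none) else c)
    (PySem.Set.add c d)

def smart_domain_dedup_alt (rules : List String) : List String :=
  let host_domains := PySem.Set.ofList
    ((rules.filter (fun r => PySem.Str.startswith r "HOST,")).map pvSecondField)
  let host_suffixes := PySem.Set.ofList
    ((rules.filter (fun r => PySem.Str.startswith r "HOST-SUFFIX,")).map pvSecondField)
  let regex_rules := PySem.Set.ofList
    (rules.filter (fun r => PySem.Str.startswith r "URL-REGEX,"))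
  let covered := host_domains.foldl pvCoverStep PySem.Set.empty
  let kept := PySem.Set.diff host_suffixes covered
  (PySem.List.sorted host_domains (fun x => x)).map (fun d => "HOST," ++ d ++ ",REJECT")
    ++ (PySem.List.sorted kept (fun x => x)).map (fun s => "HOST-SUFFIX," ++ s ++ ",REJECT")
    ++ PySem.List.sorted regex_rules (fun x => x)

-- ===== PRECONDITION & SPEC =====
def Spec_smart_domain_dedup (rules : List String) (out : List String) : Prop := out = smart_domain_dedup_alt rules
instance (rules : List String) (out : List String) : Decidable (Spec_smart_domain_dedup rules out) := by unfold Spec_smart_domain_dedup; infer_instance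

-- ===== CLAIM (what is proved, stated in full; the proofs are below) =====
def Claim_equal_smart_domain_dedup : Prop := ∀ (rules : List String), Dom_smart_domain_dedup rules → Spec_smart_domain_dedup rules (smart_domain_dedup rules)

-- ===== LEMMAS AND PROOFS =====

-- The three rule prefixes are pairwise incompatible, so A's elif chain classifies
-- exactly as B's three independent filters.
theorem pvStartswith_excl (r p q : String)
    (hnpq : ¬ p.toList <+: q.toList) (hnqp : ¬ q.toList <+: p.toList)
    (hp : PySem.Str.startswith r p = true) : PySem.Str.startswith r q = false := by
  by_contra h
  have hq : PySem.Str.startswith r q = true := by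
    cases hb : PySem.Str.startswith r q
    · exact absurd hb h
    · rfl
  rw [PySem.Str.startswith_eq, PySem.Chars.startswith_iff] at hp hq
  rcases List.prefix_or_prefix_of_prefix hp hq with h' | h'
  · exact hnpq h'
  · exact hnqp h'

-- A's classification fold decomposes into three independent filtered folds.
theorem pvClassify_eq (rules : List String)
    (st : PySem.Set String × PySem.Set String × PySem.Set String) :
    rules.foldl pvClassifyStepA st =
      (((rules.filter (fun r => PySem.Str.startswith r "HOST,")).map pvSecondField).foldl PySem.Set.add st.1,
       ((rules.filter (fun r => PySem.Str.startswith r "HOST-SUFFIX,")).map pvSecondField).foldl PySem.Set.add st.2.1,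
       (rules.filter (fun r => PySem.Str.startswith r "URL-REGEX,")).foldl PySem.Set.add st.2.2) := by
  induction rules generalizing st with
  | nil => rfl
  | cons r t ih =>
    simp only [List.foldl_cons, List.filter_cons]
    by_cases h1 : PySem.Str.startswith r "HOST," = true
    · have e2 := pvStartswith_excl r "HOST," "HOST-SUFFIX," (by decide) (by decide) h1
      have e3 := pvStartswith_excl r "HOST," "URL-REGEX," (by decide) (by decide) h1
      simp only [pvClassifyStepA, h1, e2, e3, if_pos, Bool.false_eq_true, if_neg,
        not_false_iff, List.map_cons, List.foldl_cons, ih, pvSecondField]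
    · by_cases h2 : PySem.Str.startswith r "HOST-SUFFIX," = true
      · have e3 := pvStartswith_excl r "HOST-SUFFIX," "URL-REGEX," (by decide) (by decide) h2
        simp only [pvClassifyStepA, h1, h2, e3, if_pos, Bool.false_eq_true, if_neg,
          not_false_iff, List.map_cons, List.foldl_cons, ih, pvSecondField]
      · by_cases h3 : PySem.Str.startswith r "URL-REGEX," = true
        · simp only [pvClassifyStepA, h1, h2, h3, if_pos, Bool.false_eq_true, if_neg,
            not_false_iff, List.foldl_cons, ih]
        · simp only [pvClassifyStepA, h1, h2, h3, Bool.false_eq_true, if_neg,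
            not_false_iff, ih]
        
-- Membership in a "filtering" fold of Set.add.
theorem pvFilterFold_mem {α : Type} [BEq α] [LawfulBEq α] (p : α → Bool) (l : List α)
    (acc : PySem.Set α) (x : α) :
    x ∈ l.foldl (fun acc s => if p s then PySem.Set.add acc s else acc) acc ↔
      x ∈ acc ∨ (x ∈ l ∧ p x = true) := by
  induction l generalizing acc with
  | nil => simp
  | cons s t ih =>
    simp only [List.foldl_cons, ih]
    by_cases hx : x = s
    · subst hx
      by_cases hp : p x = true <;> simp [hp, PySem.Set.mem_add]
    · by_cases hp : p s = true <;> simp [hp, PySem.Set.mem_add, hx]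

-- A "filtering" fold of Set.add keeps the accumulator duplicate-free.
theorem pvFilterFold_nodup {α : Type} [BEq α] [LawfulBEq α] (p : α → Bool) (l : List α)
    (acc : PySem.Set α) (h : acc.Nodup) :
    (l.foldl (fun acc s => if p s then PySem.Set.add acc s else acc) acc).Nodup := by
  induction l generalizing acc with
  | nil => exact h
  | cons s t ih =>
    simp only [List.foldl_cons]
    apply ih
    split_ifs <;> simp_all [PySem.Set.nodup_add]

-- `p ∈ enumerate l s` names exactly the indexed elements of l.
theorem pvMem_enumerate {α : Type} (l : List α) (s : Int) (p : Int × α) :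
    p ∈ PySem.List.enumerate l s ↔ ∃ k : Nat, l[k]? = some p.2 ∧ p.1 = s + k := by
  induction l generalizing s with
  | nil => simp [PySem.List.enumerate_nil]
  | cons c t ih =>
    rw [PySem.List.enumerate_cons]
    constructor
    · intro hp
      rcases List.mem_cons.mp hp with h | h
      · exact ⟨0, by simp [h]⟩
      · rcases (ih (s + 1)).mp h with ⟨k, hk1, hk2⟩
        exact ⟨k + 1, by simpa using hk1, by push_cast at hk2 ⊢; omega⟩
    · rintro ⟨k, hk1, hk2⟩
      cases k with
      | zero =>
        rw [List.mem_cons]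
        left
        obtain ⟨p1, p2⟩ := p
        simp only [List.getElem?_cons_zero, Option.some.injEq] at hk1
        simp only [Nat.cast_zero, add_zero] at hk2
        simp_all
      | succ k =>
        exact List.mem_cons.mpr (Or.inr ((ih (s + 1)).mpr
          ⟨k, by simpa using hk1, by push_cast at hk2 ⊢; omega⟩))

-- A dot-boundary tail is exactly a '.'-preceded suffix.
theorem pvTail_suffix_iff (l t : List Char) :
    ('.' :: t) <:+ l ↔ ∃ k : Nat, l[k]? = some '.' ∧ l.drop (k + 1) = t := by
  constructor
  · rintro ⟨u, rfl⟩
    refine ⟨u.length, by simp, ?_⟩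
    have he : u ++ '.' :: t = (u ++ ['.']) ++ t := by simp
    have hl : u.length + 1 = (u ++ ['.']).length := by simp
    rw [he, hl, List.drop_left]
  · rintro ⟨k, hk, hd⟩
    obtain ⟨hlt, hval⟩ := List.getElem?_eq_some_iff.mp hk
    have hdk : l.drop k = '.' :: t := by rw [List.drop_eq_getElem_cons hlt, hval, hd]
    exact hdk ▸ List.drop_suffix k l

-- d[k+1:] as a character list.
theorem pvSlice_toList (d : String) (k : Nat) :
    (PySem.Str.slice d (some ((k : Int) + 1)) none).toList = d.toList.drop (k + 1) := by
  have h1 : (PySem.Str.slice d (some ((k : Int) + 1)) none).toList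
      = PySem.List.slice d.toList (some ((k : Int) + 1)) none := by
    simp [PySem.Str.slice]
  rw [h1, show ((k : Int) + 1) = ((k + 1 : Nat) : Int) from by push_cast; ring,
    PySem.List.slice_from_natCast]

-- B's inner loop hits a string iff it is a '.'-preceded suffix of d.
theorem pvEnumDot_iff (d x : String) :
    (∃ p ∈ PySem.List.enumerate d.toList 0, p.2 = '.' ∧ x = PySem.Str.slice d (some (p.1 + 1)) none)
      ↔ ('.' :: x.toList) <:+ d.toList := by
  rw [pvTail_suffix_iff]
  constructor
  · rintro ⟨p, hp, hdot, rfl⟩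
    rcases (pvMem_enumerate _ 0 p).mp hp with ⟨k, hk1, hk2⟩
    have hp1 : p.1 = (k : Int) := by omega
    refine ⟨k, by rw [← hdot]; exact hk1, ?_⟩
    rw [hp1, pvSlice_toList]
  · rintro ⟨k, hk, hx⟩
    refine ⟨((k : Int), '.'), (pvMem_enumerate _ 0 _).mpr ⟨k, by simpa using hk, by simp⟩, rfl, ?_⟩
    apply String.toList_inj.mp
    rw [pvSlice_toList, hx]

-- Membership in one cover step.
theorem pvCoverStep_mem (c : PySem.Set String) (d x : String) :
    x ∈ pvCoverStep c d ↔ x ∈ c ∨ x = d ∨ ('.' :: x.toList) <:+ d.toList := by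
  unfold pvCoverStep
  have hfold : ∀ (l : List (Int × Char)) (c0 : PySem.Set String),
      x ∈ l.foldl (fun c p => if p.2 == '.' then PySem.Set.add c (PySem.Str.slice d (some (p.1 + 1)) none) else c) c0 ↔
        x ∈ c0 ∨ ∃ p ∈ l, p.2 = '.' ∧ x = PySem.Str.slice d (some (p.1 + 1)) none := by
    intro l
    induction l with
    | nil => simp
    | cons q t ih =>
      intro c0
      simp only [List.foldl_cons, ih]
      by_cases hq : q.2 = '.'
      · simp only [hq, beq_self_eq_true, if_pos, PySem.Set.mem_add]
        constructor
        · rintro ((h | h) | ⟨p, hp, h1, h2⟩)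
          · tauto
          · exact Or.inr ⟨q, by simp [hq, h]⟩
          · exact Or.inr ⟨p, by simp [hp], h1, h2⟩
        · rintro (h | ⟨p, hp, h1, h2⟩)
          · tauto
          · rcases List.mem_cons.mp hp with rfl | hp
            · exact Or.inl (Or.inr h2)
            · exact Or.inr ⟨p, hp, h1, h2⟩
      · have : (q.2 == '.') = false := by simp [hq]
        simp only [this, Bool.false_eq_true, if_neg, not_false_iff]
        constructor
        · rintro (h | ⟨p, hp, h1, h2⟩)
          · tauto
          · exact Or.inr ⟨p, by simp [hp], h1, h2⟩
        · rintro (h | ⟨p, hp, h1, h2⟩)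
          · tauto
          · rcases List.mem_cons.mp hp with rfl | hp
            · exact absurd h1 hq
            · exact Or.inr ⟨p, hp, h1, h2⟩
  rw [hfold, PySem.Set.mem_add, pvEnumDot_iff]
  tauto

-- Membership in B's covered set.
theorem pvCovered_mem (hd : List String) (acc : PySem.Set String) (x : String) :
    x ∈ hd.foldl pvCoverStep acc ↔
      x ∈ acc ∨ ∃ d ∈ hd, x = d ∨ ('.' :: x.toList) <:+ d.toList := by
  induction hd generalizing acc with
  | nil => simp
  | cons d t ih =>
    simp only [List.foldl_cons, ih, pvCoverStep_mem]
    constructor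
    · rintro ((h | h | h) | ⟨e, he, hx⟩)
      · tauto
      · exact Or.inr ⟨d, by simp, Or.inl h⟩
      · exact Or.inr ⟨d, by simp, Or.inr h⟩
      · exact Or.inr ⟨e, by simp [he], hx⟩
    · rintro (h | ⟨e, he, hx⟩)
      · tauto
      · rcases List.mem_cons.mp he with rfl | he
        · tauto
        · exact Or.inr ⟨e, he, hx⟩

-- A's per-suffix test is exactly non-membership in B's covered set (over the same domains).
theorem pvCondA_iff (hd : List String) (x : String) :
    (!(hd.any (fun d => d == x || PySem.Str.endswith d ("." ++ x)))) = true ↔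
      ¬ ∃ d ∈ hd, x = d ∨ ('.' :: x.toList) <:+ d.toList := by
  have hdot : ("." ++ x).toList = '.' :: x.toList := by rw [String.toList_append]; rfl
  have hcond : ∀ d, (d == x || PySem.Str.endswith d ("." ++ x)) = true ↔
      (x = d ∨ ('.' :: x.toList) <:+ d.toList) := by
    intro d
    rw [Bool.or_eq_true, beq_iff_eq, PySem.Str.endswith_eq, hdot, PySem.Chars.endswith_iff]
    constructor
    · rintro (rfl | h)
      exacts [Or.inl rfl, Or.inr h]
    · rintro (rfl | h)
      exacts [Or.inl rfl, Or.inr h]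
  rw [Bool.not_eq_true', List.any_eq_false]
  constructor
  · rintro h ⟨d, hd', hor⟩
    exact (h d hd') ((hcond d).mpr hor)
  · intro h d hd' htrue
    exact h ⟨d, hd', (hcond d).mp htrue⟩

-- ===== VERDICT (by name: the statement is the Claim_ definition above) =====
theorem smart_domain_dedup_spec : Claim_equal_smart_domain_dedup := by
  intro rules _
  unfold Spec_smart_domain_dedup
  simp only [smart_domain_dedup, smart_domain_dedup_alt, pvClassify_eq, PySem.Set.ofList_eq_foldl]
  set hd := ((rules.filter (fun r => PySem.Str.startswith r "HOST,")).map pvSecondField).foldl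
    PySem.Set.add PySem.Set.empty with hhd
  set hs := ((rules.filter (fun r => PySem.Str.startswith r "HOST-SUFFIX,")).map pvSecondField).foldl
    PySem.Set.add PySem.Set.empty with hhs
  have hnd_hs : hs.Nodup := PySem.Set.nodup_ofList
    ((rules.filter (fun r => PySem.Str.startswith r "HOST-SUFFIX,")).map pvSecondField)
  have hmem : ∀ x, x ∈ (hs.foldl (fun acc s =>
      if !(hd.any (fun d => d == s || PySem.Str.endswith d ("." ++ s))) then PySem.Set.add acc s
      else acc) PySem.Set.empty) ↔ x ∈ PySem.Set.diff hs (hd.foldl pvCoverStep PySem.Set.empty) := by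
    intro x
    rw [pvFilterFold_mem, PySem.Set.mem_diff, pvCovered_mem, pvCondA_iff]
    simp only [PySem.Set.empty, List.not_mem_nil, false_or]
  have hsorted : PySem.List.sorted (hs.foldl (fun acc s =>
        if !(hd.any (fun d => d == s || PySem.Str.endswith d ("." ++ s))) then PySem.Set.add acc s
        else acc) PySem.Set.empty) (fun x : String => x)
      = PySem.List.sorted (PySem.Set.diff hs (hd.foldl pvCoverStep PySem.Set.empty))
        (fun x : String => x) :=
    PySem.List.sorted_eq_sorted_of_perm _ _ _ (fun _ _ h => h)
      ((List.perm_ext_iff_of_nodup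
        (pvFilterFold_nodup _ _ _ (by simp [PySem.Set.empty]))
        (PySem.Set.nodup_diff _ _ hnd_hs)).mpr hmem)
  rw [hsorted]
  rfl
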